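-- pv_equiv track=rewrite | github.com/primrose101/CS322 | KeywordLexer.py | kwout_fsm
-- ===== SOURCE A (Python) =====
-- def kwout_fsm(string_input, index):
--     i = index
--
--     table = [
--         [1,4,4,4],
--         [4,2,4,4],
--         [4,4,3,4],
--         [4,4,4,4],
--         [4,4,4,4],
--     ]
--
--     state = 0
--     inputstate = 0
--
--     string_length = len(string_input)
--
--     while i != string_length:
--         if string_input[i] == 'O':
--             inputstate = 0
--         elif string_input[i] == 'U':
--             inputstate = 1
--         elif string_input[i] == 'T':
--             inputstate = 2
--         else:
--             inputstate = 3
--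
--         state = table[state][inputstate]
--
--         if state == 4:
--             break
--
--         i += 1
--
--     return i - index
-- ===== SOURCE B (Python) =====
-- def kwout_fsm(string_input, index):
--     kw = "OUT"
--     n = len(string_input)
--     count = 0
--     i = index
--     while i != n and count < 3 and string_input[i] == kw[count]:
--         count += 1
--         i += 1
--     return count
-- ===== Notes on version B (the rewrite author's own statement) =====
-- stated objective: simpler
-- what changed: Replaced the 5x4 transition-table FSM with a state variable and char classification by a direct prefix comparison of string_input[index:] against the literal "OUT" with a counter; the table, the state and the input-class variable disappear.
import Mathlib
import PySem

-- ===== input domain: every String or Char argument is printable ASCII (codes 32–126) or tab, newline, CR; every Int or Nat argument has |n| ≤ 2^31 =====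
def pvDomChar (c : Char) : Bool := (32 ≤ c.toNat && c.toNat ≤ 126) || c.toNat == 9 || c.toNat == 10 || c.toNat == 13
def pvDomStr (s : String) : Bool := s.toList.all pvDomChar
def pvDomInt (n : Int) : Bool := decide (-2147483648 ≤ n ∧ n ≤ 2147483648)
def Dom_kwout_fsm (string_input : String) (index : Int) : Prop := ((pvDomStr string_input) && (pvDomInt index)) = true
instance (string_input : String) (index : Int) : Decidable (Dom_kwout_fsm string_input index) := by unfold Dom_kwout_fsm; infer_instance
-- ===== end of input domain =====

-- B replaces A's transition-table FSM by a direct prefix comparison against the literal "OUT" (simpler).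

-- ===== PORT A =====
-- A's while loop; state/inputstate/table exactly as in the Python.
-- On s[i] out of range Python raises IndexError (excluded by Pre_); the port returns i - index there.
-- table[state][inputstate]: both indices are always in range in A (state ∈ 0..3 at the lookup,
-- inputstate ∈ 0..3), so pyGetD's defaults are never used.
def kwoutA_loop (s : List Char) (table : List (List Int)) (state i index : Int) : Int :=
  if i = (s.length : Int) then i - index
  else
    match hg : PySem.List.pyGet? s i with
    | none => i - index
    | some c =>
      let inputstate : Int :=
        if c = 'O' then 0 else if c = 'U' then 1 else if c = 'T' then 2 else 3
      let state' := PySem.List.pyGetD (PySem.List.pyGetD table state []) inputstate 4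
      if state' = 4 then i - index
      else kwoutA_loop s table state' (i + 1) index
termination_by ((s.length : Int) - i).toNat
decreasing_by
  have h : PySem.Raise.InRange s.length i := by
    by_contra hc
    exact absurd hg (by simp [(PySem.List.pyGet?_eq_none_iff s i).mpr hc])
  unfold PySem.Raise.InRange at h
  omega

def kwout_fsm (string_input : String) (index : Int) : Int :=
  kwoutA_loop string_input.toList
    [[1,4,4,4],[4,2,4,4],[4,4,3,4],[4,4,4,4],[4,4,4,4]] 0 index index

-- ===== PORT B =====
-- B's while loop: the three conditions in Python's order; on an out-of-range s[i] Python raises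
-- IndexError (excluded by Pre_); the port returns count there.  kw[count] always exists (count < 3).
def kwoutB_loop (s kw : List Char) (count i : Int) : Int :=
  if i = (s.length : Int) then count
  else if count < 3 then
    match hg : PySem.List.pyGet? s i, PySem.List.pyGet? kw count with
    | some a, some b => if a = b then kwoutB_loop s kw (count + 1) (i + 1) else count
    | _, _ => count
  else count
termination_by ((s.length : Int) - i).toNat
decreasing_by
  have h : PySem.Raise.InRange s.length i := by
    by_contra hc
    exact absurd hg (by simp [(PySem.List.pyGet?_eq_none_iff s i).mpr hc])
  unfold PySem.Raise.InRange at h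
  omega

def kwout_fsm_alt (string_input : String) (index : Int) : Int :=
  kwoutB_loop string_input.toList "OUT".toList 0 index

-- ===== PRECONDITION & SPEC =====
-- Pre_ excludes exactly the inputs where Python A raises IndexError: index > len or index < -len.
def Pre_kwout_fsm (string_input : String) (index : Int) : Prop :=
  -(string_input.toList.length : Int) ≤ index ∧ index ≤ (string_input.toList.length : Int)
instance (string_input : String) (index : Int) : Decidable (Pre_kwout_fsm string_input index) := by
  unfold Pre_kwout_fsm; infer_instance
def pvWitness_kwout_fsm : String × Int := ("OUTPUT", 0)

def Spec_kwout_fsm (string_input : String) (index : Int) (out : Int) : Prop := out = kwout_fsm_alt string_input index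
instance (string_input : String) (index : Int) (out : Int) : Decidable (Spec_kwout_fsm string_input index out) := by unfold Spec_kwout_fsm; infer_instance

-- ===== CLAIM (what is proved, stated in full; the proofs are below) =====
def Claim_equal_kwout_fsm : Prop := ∀ (string_input : String) (index : Int), Dom_kwout_fsm string_input index → Pre_kwout_fsm string_input index → Spec_kwout_fsm string_input index (kwout_fsm string_input index)

-- ===== LEMMAS AND PROOFS =====

-- unfolding lemmas for the two loops
theorem kwoutA_stop (s : List Char) (table : List (List Int)) (c i index : Int)
    (h : i = (s.length : Int)) : kwoutA_loop s table c i index = i - index := by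
  unfold kwoutA_loop; rw [if_pos h]

theorem kwoutA_none (s : List Char) (table : List (List Int)) (c i index : Int)
    (hne : i ≠ (s.length : Int)) (hg : PySem.List.pyGet? s i = none) :
    kwoutA_loop s table c i index = i - index := by
  unfold kwoutA_loop; rw [if_neg hne]; split <;> simp_all

theorem kwoutA_step (s : List Char) (table : List (List Int)) (c i index : Int) (a : Char)
    (hne : i ≠ (s.length : Int)) (hg : PySem.List.pyGet? s i = some a) :
    kwoutA_loop s table c i index =
      (let inputstate : Int := if a = 'O' then 0 else if a = 'U' then 1 else if a = 'T' then 2 else 3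
       let state' := PySem.List.pyGetD (PySem.List.pyGetD table c []) inputstate 4
       if state' = 4 then i - index else kwoutA_loop s table state' (i + 1) index) := by
  conv_lhs => unfold kwoutA_loop
  rw [if_neg hne]
  split <;> simp_all

theorem kwoutB_stop (s kw : List Char) (c i : Int)
    (h : i = (s.length : Int)) : kwoutB_loop s kw c i = c := by
  unfold kwoutB_loop; rw [if_pos h]

theorem kwoutB_none (s kw : List Char) (c i : Int)
    (hne : i ≠ (s.length : Int)) (hg : PySem.List.pyGet? s i = none) :
    kwoutB_loop s kw c i = c := by
  unfold kwoutB_loop; rw [if_neg hne]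
  split_ifs
  · split <;> simp_all
  · rfl

theorem kwoutB_step (s kw : List Char) (c i : Int) (a b : Char)
    (hne : i ≠ (s.length : Int)) (hc3 : c < 3)
    (hg : PySem.List.pyGet? s i = some a) (hb : PySem.List.pyGet? kw c = some b) :
    kwoutB_loop s kw c i = if a = b then kwoutB_loop s kw (c + 1) (i + 1) else c := by
  conv_lhs => unfold kwoutB_loop
  rw [if_neg hne, if_pos hc3]
  split <;> simp_all

-- Invariant tying the two loops: for state/count c ∈ {0,1,2,3}, A's loop from (c, i) returns
-- (i - index) plus exactly what B's loop adds to c from (c, i).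
theorem kwout_loops_eq (s : List Char) :
    ∀ (n : Nat) (c i index : Int), ((s.length : Int) - i).toNat = n →
      (c = 0 ∨ c = 1 ∨ c = 2 ∨ c = 3) →
      kwoutA_loop s [[1,4,4,4],[4,2,4,4],[4,4,3,4],[4,4,4,4],[4,4,4,4]] c i index
        = (i - index) + (kwoutB_loop s "OUT".toList c i - c) := by
  intro n
  induction n with
  | zero =>
    intro c i index hn _
    by_cases h : i = (s.length : Int)
    · rw [kwoutA_stop _ _ _ _ _ h, kwoutB_stop _ _ _ _ h]; ring
    · have hnone : PySem.List.pyGet? s i = none := by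
        rw [PySem.List.pyGet?_eq_none_iff]
        unfold PySem.Raise.InRange
        omega
      rw [kwoutA_none _ _ _ _ _ h hnone, kwoutB_none _ _ _ _ h hnone]; ring
  | succ n ih =>
    intro c i index hn hc
    have hne : i ≠ (s.length : Int) := by omega
    have hfe : ((s.length : Int) - (i + 1)).toNat = n := by omega
    cases hg : PySem.List.pyGet? s i with
    | none => rw [kwoutA_none _ _ _ _ _ hne hg, kwoutB_none _ _ _ _ hne hg]; ring
    | some a =>
      rw [kwoutA_step _ _ c _ _ a hne hg]
      have g00 : PySem.List.pyGetD [(1:Int),4,4,4] (0:Int) (4:Int) = 1 := by decide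
      have g01 : PySem.List.pyGetD [(1:Int),4,4,4] (1:Int) (4:Int) = 4 := by decide
      have g02 : PySem.List.pyGetD [(1:Int),4,4,4] (2:Int) (4:Int) = 4 := by decide
      have g03 : PySem.List.pyGetD [(1:Int),4,4,4] (3:Int) (4:Int) = 4 := by decide
      have G10 : PySem.List.pyGetD (PySem.List.pyGetD [[(1:Int),4,4,4],[4,2,4,4],[4,4,3,4],[4,4,4,4],[4,4,4,4]] (1:Int) []) (0:Int) (4:Int) = 4 := by decide
      have G11 : PySem.List.pyGetD (PySem.List.pyGetD [[(1:Int),4,4,4],[4,2,4,4],[4,4,3,4],[4,4,4,4],[4,4,4,4]] (1:Int) []) (1:Int) (4:Int) = 2 := by decide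
      have G12 : PySem.List.pyGetD (PySem.List.pyGetD [[(1:Int),4,4,4],[4,2,4,4],[4,4,3,4],[4,4,4,4],[4,4,4,4]] (1:Int) []) (2:Int) (4:Int) = 4 := by decide
      have G13 : PySem.List.pyGetD (PySem.List.pyGetD [[(1:Int),4,4,4],[4,2,4,4],[4,4,3,4],[4,4,4,4],[4,4,4,4]] (1:Int) []) (3:Int) (4:Int) = 4 := by decide
      have G20 : PySem.List.pyGetD (PySem.List.pyGetD [[(1:Int),4,4,4],[4,2,4,4],[4,4,3,4],[4,4,4,4],[4,4,4,4]] (2:Int) []) (0:Int) (4:Int) = 4 := by decide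
      have G21 : PySem.List.pyGetD (PySem.List.pyGetD [[(1:Int),4,4,4],[4,2,4,4],[4,4,3,4],[4,4,4,4],[4,4,4,4]] (2:Int) []) (1:Int) (4:Int) = 4 := by decide
      have G22 : PySem.List.pyGetD (PySem.List.pyGetD [[(1:Int),4,4,4],[4,2,4,4],[4,4,3,4],[4,4,4,4],[4,4,4,4]] (2:Int) []) (2:Int) (4:Int) = 3 := by decide
      have G23 : PySem.List.pyGetD (PySem.List.pyGetD [[(1:Int),4,4,4],[4,2,4,4],[4,4,3,4],[4,4,4,4],[4,4,4,4]] (2:Int) []) (3:Int) (4:Int) = 4 := by decide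
      have G30 : PySem.List.pyGetD (PySem.List.pyGetD [[(1:Int),4,4,4],[4,2,4,4],[4,4,3,4],[4,4,4,4],[4,4,4,4]] (3:Int) []) (0:Int) (4:Int) = 4 := by decide
      have G31 : PySem.List.pyGetD (PySem.List.pyGetD [[(1:Int),4,4,4],[4,2,4,4],[4,4,3,4],[4,4,4,4],[4,4,4,4]] (3:Int) []) (1:Int) (4:Int) = 4 := by decide
      have G32 : PySem.List.pyGetD (PySem.List.pyGetD [[(1:Int),4,4,4],[4,2,4,4],[4,4,3,4],[4,4,4,4],[4,4,4,4]] (3:Int) []) (2:Int) (4:Int) = 4 := by decide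
      have G33 : PySem.List.pyGetD (PySem.List.pyGetD [[(1:Int),4,4,4],[4,2,4,4],[4,4,3,4],[4,4,4,4],[4,4,4,4]] (3:Int) []) (3:Int) (4:Int) = 4 := by decide
      rcases hc with hc | hc | hc | hc <;> subst hc
      · -- count = 0 : expected char 'O'
        rw [kwoutB_step s _ 0 i a 'O' hne (by norm_num) hg (by decide)]
        by_cases hO : a = 'O'
        · have h1 := ih 1 (i + 1) index hfe (by norm_num)
          simp [hO, h1, g00]
          omega
        · by_cases hU : a = 'U' <;> by_cases hT : a = 'T' <;>
            simp [hO, hU, hT, g01, g02, g03]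
      · -- count = 1 : expected char 'U'
        rw [kwoutB_step s _ 1 i a 'U' hne (by norm_num) hg (by decide)]
        by_cases hU : a = 'U'
        · have h1 := ih 2 (i + 1) index hfe (by norm_num)
          simp [hU, h1, G11]
          omega
        · by_cases hO : a = 'O' <;> by_cases hT : a = 'T' <;>
            simp [hO, hU, hT, G10, G12, G13]
      · -- count = 2 : expected char 'T'
        rw [kwoutB_step s _ 2 i a 'T' hne (by norm_num) hg (by decide)]
        by_cases hT : a = 'T'
        · have h1 := ih 3 (i + 1) index hfe (by norm_num)
          simp [hT, h1, G22]
          omega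
        · by_cases hO : a = 'O' <;> by_cases hU : a = 'U' <;>
            simp [hO, hU, hT, G20, G21, G23]
      · -- count = 3 : A's row 3 is all 4s (break); B stops on count < 3
        have hB : kwoutB_loop s "OUT".toList 3 i = 3 := by
          unfold kwoutB_loop
          rw [if_neg hne]
          norm_num
        rw [hB]
        by_cases hO : a = 'O' <;> by_cases hU : a = 'U' <;> by_cases hT : a = 'T' <;>
          simp [hO, hU, hT, G30, G31, G32, G33]

-- ===== VERDICT (by name: the statement is the Claim_ definition above) =====
theorem kwout_fsm_spec : Claim_equal_kwout_fsm := by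
  intro s index _ _
  unfold Spec_kwout_fsm kwout_fsm kwout_fsm_alt
  have h := kwout_loops_eq s.toList (((s.toList.length : Int) - index).toNat) 0 index index rfl
    (by norm_num)
  omega
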